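-- pv_equiv track=rewrite | github.com/yuhuoji/Python | src/leetcode/contest/weekly_contest_482.py | maximumScore1
-- ===== SOURCE A (Python) =====
-- from typing import List
--
-- from math import inf
--
-- def maximumScore1(nums: List[int]) -> int:
--     n = len(nums)
--     suf_min = [0] * n
--     suf_min[-1] = nums[-1]
--     for i in range(n - 2, -1, -1):
--         suf_min[i] = min(suf_min[i + 1], nums[i + 1])
--
--     ans = -inf
--     pre_sum = 0
--     for i in range(n - 1):
--         pre_sum += nums[i]
--         ans = max(ans, pre_sum - suf_min[i])
--     return ans
-- ===== SOURCE B (Python) =====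
-- from math import inf
--
-- def maximumScore1(nums):
--     # one forward pass: ans = max over k of (best prefix-sum before k) - nums[k]
--     pre = best = nums[0]
--     ans = -inf
--     for v in nums[1:]:
--         ans = max(ans, best - v)
--         pre += v
--         best = max(best, pre)
--     return ans
-- ===== Notes on version B (the rewrite author's own statement) =====
-- stated objective: simpler
-- what changed: Replaces the suffix-min array and second indexed pass with a single forward pass keeping the running prefix sum and its maximum, using max_i(pre_i - min_{k>i} nums_k) = max_k(max_{i<k} pre_i - nums_k).
-- outside the precondition, e.g. on maximumScore1([5]): A returns -inf, B returns -inf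
import Mathlib
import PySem

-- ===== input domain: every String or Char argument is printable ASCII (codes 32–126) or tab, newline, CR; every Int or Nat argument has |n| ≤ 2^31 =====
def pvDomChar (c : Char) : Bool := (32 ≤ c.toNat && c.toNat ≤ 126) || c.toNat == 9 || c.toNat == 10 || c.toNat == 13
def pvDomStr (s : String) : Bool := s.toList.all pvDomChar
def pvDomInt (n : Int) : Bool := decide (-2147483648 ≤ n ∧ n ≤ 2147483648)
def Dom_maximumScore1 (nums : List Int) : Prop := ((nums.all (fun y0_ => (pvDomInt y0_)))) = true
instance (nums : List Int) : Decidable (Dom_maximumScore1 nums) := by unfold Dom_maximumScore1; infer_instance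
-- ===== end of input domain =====

-- B replaces A's suffix-min array and second pass by a single forward pass keeping the
-- running prefix sum and its maximum (simpler: no auxiliary array).

-- ===== PORT A =====
-- Transliteration of A: build suf_min back-to-front, then a forward pass over i in [0, n-2].
-- Python's float -inf accumulator is ported as Option Int (none = -inf); the final .getD 0
-- is reached only for n ≤ 1, which Pre_ excludes (Python returns the float -inf there / raises).
def maximumScore1 (nums : List Int) : Int :=
  let n : Int := nums.length
  let sufMin0 : List Int := List.replicate nums.length 0
  let sufMin1 : List Int := sufMin0.set (nums.length - 1) ((PySem.List.pyGet? nums (-1)).getD 0)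
  let sufMin : List Int := (PySem.List.pyRange (n - 2) (-1) (-1)).foldl
      (fun s i => s.set i.toNat
        (min (PySem.List.pyGetD s (i + 1) 0) (PySem.List.pyGetD nums (i + 1) 0))) sufMin1
  let st := (PySem.List.pyRange 0 (n - 1) 1).foldl
      (fun (st : Int × Option Int) i =>
        let pre := st.1 + PySem.List.pyGetD nums i 0
        let t := pre - PySem.List.pyGetD sufMin i 0
        (pre, some (match st.2 with | none => t | some a => max a t))) ((0 : Int), (none : Option Int))
  st.2.getD 0

-- ===== PORT B =====
-- Transliteration of B: one forward pass over nums[1:] with state (pre, best, ans);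
-- ans's -inf start is ported as Option Int (none = -inf), .getD 0 reached only for n ≤ 1.
def maximumScore1_alt (nums : List Int) : Int :=
  match nums with
  | [] => 0          -- Python B raises IndexError on nums[0] here; outside Pre_
  | x :: _ =>
    let st := (PySem.List.slice nums (some 1) none).foldl
      (fun (st : Int × Int × Option Int) v =>
        let ans : Option Int :=
          some (match st.2.2 with | none => st.2.1 - v | some a => max a (st.2.1 - v))
        let pre := st.1 + v
        (pre, max st.2.1 pre, ans)) (x, x, (none : Option Int))
    st.2.2.getD 0

-- ===== PRECONDITION & SPEC =====
-- Pre_ excludes the empty list (A raises IndexError on nums[-1]) and singletons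
-- (A returns the float -inf, not a value of the declared int type).
def Pre_maximumScore1 (nums : List Int) : Prop := 2 ≤ nums.length
instance (nums : List Int) : Decidable (Pre_maximumScore1 nums) := by
  unfold Pre_maximumScore1; infer_instance

def pvWitness_maximumScore1 : List Int := [3, 1, 2]

def Spec_maximumScore1 (nums : List Int) (out : Int) : Prop := out = maximumScore1_alt nums
instance (nums : List Int) (out : Int) : Decidable (Spec_maximumScore1 nums out) := by
  unfold Spec_maximumScore1; infer_instance

-- ===== CLAIM (what is proved, stated in full; the proofs are below) =====
def Claim_equal_maximumScore1 : Prop := ∀ (nums : List Int), Dom_maximumScore1 nums →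
  Pre_maximumScore1 nums → Spec_maximumScore1 nums (maximumScore1 nums)

-- ===== LEMMAS AND PROOFS =====

-- ans-accumulator: ans' = max(ans, x) with none playing -inf
def omax (o : Option Int) (x : Int) : Option Int :=
  some (match o with | none => x | some a => max a x)

-- min of a nonempty list
def minL : List Int → Int
  | [] => 0
  | x :: xs => match xs with | [] => x | _ :: _ => min x (minL xs)

-- the intended content of A's suf_min array: sufSpec nums jth entry = min(nums[j+1:]) (last = nums[-1])
def sufSpec : List Int → List Int
  | [] => []
  | [a] => [a]
  | _ :: b :: t => minL (b :: t) :: sufSpec (b :: t)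

-- value of A's forward loop on x :: l (l ≠ []), as a structural recursion
def FA : Int → List Int → Int
  | _, [] => 0
  | c, v :: t => match t with
    | [] => c - v
    | _ :: _ => max (c - minL (v :: t)) (FA (c + v) t)

-- value of B's loop on tail l from state (p, b, -inf), as a structural recursion
def HB : Int → Int → List Int → Int
  | _, _, [] => 0
  | p, b, v :: t => match t with
    | [] => b - v
    | _ :: _ => max (b - v) (HB (p + v) (max b (p + v)) t)

lemma length_sufSpec (l : List Int) : (sufSpec l).length = l.length := by
  induction l using sufSpec.induct <;> simp [sufSpec, *]

lemma sufSpec_last (l : List Int) (h : l ≠ []) :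
    (sufSpec l)[l.length - 1]? = l[l.length - 1]? := by
  induction l using sufSpec.induct with
  | case1 => simp at h
  | case2 a => simp [sufSpec]
  | case3 a b t ih =>
    have := ih (by simp)
    simpa [sufSpec, List.length_cons] using this

lemma sufSpec_rec (l : List Int) (j : Nat) (hj : j + 1 < l.length) (a b : Int)
    (ha : (sufSpec l)[j + 1]? = some a) (hb : l[j + 1]? = some b) :
    (sufSpec l)[j]? = some (min a b) := by
  induction l using sufSpec.induct generalizing j with
  | case1 => simp at hj
  | case2 c => simp at hj
  | case3 c d t ih =>
    match j with
    | 0 =>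
      match t with
      | [] =>
        simp [sufSpec, minL] at ha hb ⊢
        omega
      | e :: t' =>
        simp [sufSpec] at ha hb ⊢
        simp [minL] at ha ⊢
        omega
    | j + 1 =>
      have hj' : j + 1 < (d :: t).length := by simpa using hj
      have := ih j hj' (by simpa [sufSpec] using ha) (by simpa using hb)
      simpa [sufSpec] using this

lemma sufFold (nums : List Int) (hn : 2 ≤ nums.length) :
    ∀ (k : Nat) (s : List Int), k ≤ nums.length - 1 → s.length = nums.length →
    (∀ j : Nat, k ≤ j → s[j]? = (sufSpec nums)[j]?) →
    (PySem.List.pyRange ((k : Int) - 1) (-1) (-1)).foldl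
      (fun s i => s.set i.toNat
        (min (PySem.List.pyGetD s (i + 1) 0) (PySem.List.pyGetD nums (i + 1) 0))) s
    = sufSpec nums := by
  intro k
  induction k with
  | zero =>
    intro s _hk hs hagree
    rw [show ((0 : Nat) : Int) - 1 = -1 by norm_num,
        PySem.List.pyRange_neg_one_eq_nil (by norm_num)]
    simp only [List.foldl_nil]
    exact List.ext_getElem? fun j => hagree j (Nat.zero_le j)
  | succ k ih =>
    intro s hk hs hagree
    have hkn : k + 1 < nums.length := by omega
    have hks : k + 1 < s.length := by omega
    have hg1 : PySem.List.pyGetD s ((k : Int) + 1) 0 = s[k + 1] := by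
      rw [show (k : Int) + 1 = ((k + 1 : Nat) : Int) by push_cast; ring,
          PySem.List.pyGetD_eq_getElem s 0 (by positivity) (by exact_mod_cast hks)]
      simp
    have hg2 : PySem.List.pyGetD nums ((k : Int) + 1) 0 = nums[k + 1] := by
      rw [show (k : Int) + 1 = ((k + 1 : Nat) : Int) by push_cast; ring,
          PySem.List.pyGetD_eq_getElem nums 0 (by positivity) (by exact_mod_cast hkn)]
      simp
    have hsufk1 : (sufSpec nums)[k + 1]? = some s[k + 1] := by
      rw [← hagree (k + 1) (by omega)]
      exact (List.getElem?_eq_getElem hks).symm ▸ rfl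
    have hrec : (sufSpec nums)[k]? = some (min s[k + 1] nums[k + 1]) :=
      sufSpec_rec nums k hkn s[k + 1] nums[k + 1] hsufk1 (List.getElem?_eq_getElem hkn)
    rw [show ((k + 1 : Nat) : Int) - 1 = (k : Int) by push_cast; ring,
        PySem.List.pyRange_neg_one_cons (by omega : (-1 : Int) < (k : Int)), List.foldl_cons]
    have hbody : s.set ((k : Int)).toNat
        (min (PySem.List.pyGetD s ((k : Int) + 1) 0) (PySem.List.pyGetD nums ((k : Int) + 1) 0))
        = s.set k (min s[k + 1] nums[k + 1]) := by
      rw [hg1, hg2]; simp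
    rw [hbody]
    apply ih
    · omega
    · simpa using hs
    · intro j hj
      rcases Nat.lt_or_ge k j with hlt | hge
      · rw [List.getElem?_set_ne (by omega)]
        exact hagree j (by omega)
      · have : j = k := by omega
        subst this
        rw [List.getElem?_set_self (by omega), hrec]

lemma fold_idx_zip {σ : Type} (u w : List Int) (g : σ → Int → Int → σ) :
    ∀ (m : Nat) (init : σ), m ≤ u.length → m ≤ w.length →
    (PySem.List.pyRange 0 (m : Int) 1).foldl
      (fun st i => g st (PySem.List.pyGetD u i 0) (PySem.List.pyGetD w i 0)) init
    = ((u.zip w).take m).foldl (fun st p => g st p.1 p.2) init := by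
  intro m
  induction m with
  | zero =>
    intro init _ _
    rw [show ((0 : Nat) : Int) = 0 by norm_num, PySem.List.pyRange_one_eq_nil le_rfl]
    simp
  | succ m ih =>
    intro init hmu hmw
    have hm : m < (u.zip w).length := by rw [List.length_zip]; omega
    have hgu : PySem.List.pyGetD u ((m : Nat) : Int) 0 = u[m] := by
      rw [PySem.List.pyGetD_eq_getElem u 0 (by positivity) (by exact_mod_cast (by omega : m < u.length))]
      simp
      rfl
    have hgw : PySem.List.pyGetD w ((m : Nat) : Int) 0 = w[m] := by
      rw [PySem.List.pyGetD_eq_getElem w 0 (by positivity) (by exact_mod_cast (by omega : m < w.length))]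
      simp
      rfl
    rw [show ((m + 1 : Nat) : Int) = ((m : Nat) : Int) + 1 by push_cast; ring,
        PySem.List.pyRange_one_succ_right (by positivity), List.foldl_append,
        ih init (by omega) (by omega), List.take_add_one,
        List.getElem?_eq_getElem hm, List.foldl_append]
    simp only [Option.toList_some, List.foldl_cons, List.foldl_nil, List.getElem_zip, hgu, hgw]
    rfl

lemma omax_omax (o : Option Int) (u v : Int) : omax (omax o u) v = omax o (max u v) := by
  cases o <;> simp [omax, max_assoc]

lemma A_loop (l : List Int) : l ≠ [] → ∀ (x p : Int) (ans : Option Int),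
    ((((x :: l).zip (sufSpec (x :: l))).take l.length).foldl
      (fun st pr => (st.1 + pr.1, omax st.2 (st.1 + pr.1 - pr.2))) (p, ans)).2
    = omax ans (FA (p + x) l) := by
  induction l with
  | nil => intro h; exact absurd rfl h
  | cons v t ih =>
    intro _ x p ans
    cases t with
    | nil => rfl
    | cons e t' =>
      have ht : (e :: t') ≠ [] := List.cons_ne_nil e t'
      show (List.foldl (fun st pr => (st.1 + pr.1, omax st.2 (st.1 + pr.1 - pr.2)))
          (p + x, omax ans (p + x - minL (v :: e :: t')))
          (((v :: e :: t').zip (sufSpec (v :: e :: t'))).take (e :: t').length)).2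
        = omax ans (FA (p + x) (v :: e :: t'))
      rw [ih ht v (p + x) (omax ans (p + x - minL (v :: e :: t'))), omax_omax]
      rfl

lemma B_loop (l : List Int) : l ≠ [] → ∀ (p b : Int) (ans : Option Int),
    (l.foldl (fun (st : Int × Int × Option Int) v =>
        (st.1 + v, max st.2.1 (st.1 + v), omax st.2.2 (st.2.1 - v))) (p, b, ans)).2.2
    = omax ans (HB p b l) := by
  induction l with
  | nil => intro h; exact absurd rfl h
  | cons v t ih =>
    intro _ p b ans
    cases t with
    | nil => rfl
    | cons e t' =>
      have ht : (e :: t') ≠ [] := List.cons_ne_nil e t'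
      show ((List.foldl (fun (st : Int × Int × Option Int) v =>
          (st.1 + v, max st.2.1 (st.1 + v), omax st.2.2 (st.2.1 - v)))
          (p + v, max b (p + v), omax ans (b - v)) (e :: t')).2.2)
        = omax ans (HB p b (v :: e :: t'))
      rw [ih ht (p + v) (max b (p + v)) (omax ans (b - v)), omax_omax]
      rfl

lemma HB_split (t : List Int) : t ≠ [] → ∀ (p a b : Int),
    HB p (max a b) t = max (a - minL t) (HB p b t) := by
  induction t with
  | nil => intro h; exact absurd rfl h
  | cons v t ih =>
    intro _ p a b
    cases t with
    | nil =>
      show max a b - v = max (a - v) (b - v)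
      omega
    | cons e t' =>
      have ht : (e :: t') ≠ [] := List.cons_ne_nil e t'
      show max (max a b - v) (HB (p + v) (max (max a b) (p + v)) (e :: t'))
        = max (a - min v (minL (e :: t'))) (max (b - v) (HB (p + v) (max b (p + v)) (e :: t')))
      rw [max_assoc a b (p + v), ih ht (p + v) a (max b (p + v))]
      omega

lemma HB_eq_FA (l : List Int) : l ≠ [] → ∀ x : Int, HB x x l = FA x l := by
  induction l with
  | nil => intro h; exact absurd rfl h
  | cons v t ih =>
    intro _ x
    cases t with
    | nil => rfl
    | cons e t' =>
      have ht : (e :: t') ≠ [] := List.cons_ne_nil e t'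
      show max (x - v) (HB (x + v) (max x (x + v)) (e :: t'))
        = max (x - min v (minL (e :: t'))) (FA (x + v) (e :: t'))
      rw [HB_split (e :: t') ht (x + v) x (x + v), ih ht (x + v)]
      omega

lemma A_eq (x : Int) (l : List Int) (hl : l ≠ []) : maximumScore1 (x :: l) = FA x l := by
  have hidx : (x :: l).length - 1 = l.length := by simp
  have hs1len : ((List.replicate (x :: l).length (0 : Int)).set ((x :: l).length - 1)
      ((PySem.List.pyGet? (x :: l) (-1)).getD 0)).length = (x :: l).length := by simp
  have hagree : ∀ j : Nat, l.length ≤ j →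
      ((List.replicate (x :: l).length (0 : Int)).set ((x :: l).length - 1)
        ((PySem.List.pyGet? (x :: l) (-1)).getD 0))[j]? = (sufSpec (x :: l))[j]? := by
    intro j hj
    rcases eq_or_lt_of_le hj with heq | hlt2
    · subst heq
      have hlast : (x :: l).getLast? = (x :: l)[l.length]? := by
        rw [List.getLast?_eq_getElem?, hidx]
      have h2 := sufSpec_last (x :: l) (List.cons_ne_nil x l)
      rw [hidx] at h2
      rw [hidx, List.getElem?_set_self (by simp), PySem.List.pyGet?_neg_one, hlast, h2,
          List.getElem?_eq_getElem (by simp)]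
      rfl
    · rw [List.getElem?_eq_none (by simp; omega),
          List.getElem?_eq_none (by rw [length_sufSpec]; simp; omega)]
  have hsuf := sufFold (x :: l) (by simpa using List.length_pos_of_ne_nil hl) l.length
      ((List.replicate (x :: l).length (0 : Int)).set ((x :: l).length - 1)
        ((PySem.List.pyGet? (x :: l) (-1)).getD 0))
      hidx.ge hs1len hagree
  have hfold := fold_idx_zip (x :: l) (sufSpec (x :: l))
      (fun st a b => (st.1 + a, omax st.2 (st.1 + a - b))) l.length
      ((0 : Int), (none : Option Int)) (by simp) (by rw [length_sufSpec]; simp)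
  calc maximumScore1 (x :: l)
      = (List.foldl
          (fun (st : Int × Option Int) i =>
            (st.1 + PySem.List.pyGetD (x :: l) i 0,
             omax st.2 (st.1 + PySem.List.pyGetD (x :: l) i 0 -
               PySem.List.pyGetD (List.foldl
                 (fun s i => s.set i.toNat
                   (min (PySem.List.pyGetD s (i + 1) 0) (PySem.List.pyGetD (x :: l) (i + 1) 0)))
                 ((List.replicate (x :: l).length (0 : Int)).set ((x :: l).length - 1)
                   ((PySem.List.pyGet? (x :: l) (-1)).getD 0))
                 (PySem.List.pyRange (((x :: l).length : Int) - 2) (-1) (-1))) i 0)))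
          ((0 : Int), (none : Option Int))
          (PySem.List.pyRange 0 (((x :: l).length : Int) - 1) 1)).2.getD 0 := rfl
    _ = FA x l := by
        rw [show ((x :: l).length : Int) - 2 = ((l.length : Nat) : Int) - 1 by
          push_cast [List.length_cons]; omega]
        rw [hsuf]
        rw [show ((x :: l).length : Int) - 1 = ((l.length : Nat) : Int) by
          push_cast [List.length_cons]; omega]
        rw [hfold]
        rw [A_loop l hl x 0 none]
        simp [omax]

lemma B_eq (x : Int) (l : List Int) (hl : l ≠ []) : maximumScore1_alt (x :: l) = HB x x l := by
  cases l with
  | nil => exact absurd rfl hl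
  | cons v t =>
    show ((List.foldl (fun (st : Int × Int × Option Int) w =>
        (st.1 + w, max st.2.1 (st.1 + w), omax st.2.2 (st.2.1 - w)))
        (x, x, (none : Option Int)) (PySem.List.slice (x :: v :: t) (some 1) none)).2.2).getD 0
      = HB x x (v :: t)
    rw [PySem.List.slice_from (x :: v :: t) (by norm_num : (0 : Int) ≤ 1), show ((1 : Int).toNat) = 1 from rfl,
        List.drop_one, List.tail_cons,
        B_loop (v :: t) (List.cons_ne_nil v t) x x none]
    rfl

-- ===== VERDICT (by name: the statement is the Claim_ definition above) =====
theorem maximumScore1_spec : Claim_equal_maximumScore1 := by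
  intro nums _hdom hpre
  unfold Spec_maximumScore1
  match nums, hpre with
  | x :: v :: t, _ =>
    have hl : (v :: t) ≠ [] := by simp
    rw [A_eq x (v :: t) hl, B_eq x (v :: t) hl, HB_eq_FA (v :: t) hl x]
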